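-- pv_equiv track=rewrite | github.com/kieranhj/Rose | arc/bin/rose2arc.py | get_immediate_for_constant
-- ===== SOURCE A (Python) =====
-- def get_immediate_for_constant(c):
--     # Check if constant can be represented as an immediate load.
--     if c == 0:
--         return True
--
--     first_bit=32
--     last_bit=-1
--
--     for bit in range(0, 31):
--         if c & (1<<bit) != 0:
--             if bit < first_bit:
--                 first_bit = bit
--
--             if bit > last_bit:
--                 last_bit = bit
--
--     bit_range = last_bit - first_bit
--     return bit_range <= 8
-- ===== SOURCE B (Python) =====
-- def get_immediate_for_constant(c):
--     # Check if constant can be represented as an immediate load.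
--     # Strip trailing zero bits of the low 31 bits; the remainder must fit in 9 bits.
--     m = c & 0x7FFFFFFF
--     while m != 0 and m % 2 == 0:
--         m //= 2
--     return m < 512
-- ===== Notes on version B (the rewrite author's own statement) =====
-- stated objective: simpler
-- what changed: Replaces the bit-by-bit scan that tracks the lowest and highest set bit of the low bits with a short loop that strips trailing zero bits of the masked value and checks that the remainder fits in nine bits.
import Mathlib
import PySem

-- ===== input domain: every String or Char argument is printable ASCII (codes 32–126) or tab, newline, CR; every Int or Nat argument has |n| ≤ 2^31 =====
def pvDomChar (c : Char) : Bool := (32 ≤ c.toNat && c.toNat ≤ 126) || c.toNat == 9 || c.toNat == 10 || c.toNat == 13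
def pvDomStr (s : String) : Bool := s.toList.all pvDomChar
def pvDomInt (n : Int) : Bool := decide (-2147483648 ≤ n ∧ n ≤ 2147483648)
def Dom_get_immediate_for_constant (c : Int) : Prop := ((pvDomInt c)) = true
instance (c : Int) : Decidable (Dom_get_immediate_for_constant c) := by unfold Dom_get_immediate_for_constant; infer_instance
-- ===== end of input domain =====

-- B replaces A's lowest/highest-set-bit scan by stripping trailing zero bits of the
-- masked value and checking the remainder fits in nine bits; same result, a simpler loop.

-- ===== PORT A =====
-- literal transliteration: the for-loop over range(0, 31) carrying (first_bit, last_bit)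
-- becomes a foldl over pyRange; 'c & (1 << bit)' is band c (1 <<< bit.toNat) (bit ≥ 0 here).
def get_immediate_for_constant (c : Int) : Bool :=
  if c = 0 then true
  else
    let st := (PySem.List.pyRange 0 31 1).foldl
      (fun (st : Int × Int) (bit : Int) =>
        if PySem.Int.band c (1 <<< bit.toNat) ≠ 0 then
          (if bit < st.1 then bit else st.1, if bit > st.2 then bit else st.2)
        else st)
      (32, -1)
    decide (st.2 - st.1 ≤ 8)

-- ===== PORT B =====
-- the while-loop of Source B; m = c & 0x7FFFFFFF is nonnegative, so the loop runs in Nat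
-- exactly as in Python ('m //= 2' on a nonnegative int is Nat division).
def pvStripLow (m : Nat) : Nat :=
  if m ≠ 0 ∧ m % 2 = 0 then pvStripLow (m / 2) else m
termination_by m
decreasing_by omega

def get_immediate_for_constant_alt (c : Int) : Bool :=
  decide (pvStripLow (PySem.Int.band c 0x7FFFFFFF).toNat < 512)

-- ===== PRECONDITION & SPEC =====
def Spec_get_immediate_for_constant (c : Int) (out : Bool) : Prop := out = get_immediate_for_constant_alt c
instance (c : Int) (out : Bool) : Decidable (Spec_get_immediate_for_constant c out) := by unfold Spec_get_immediate_for_constant; infer_instance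

-- ===== CLAIM (what is proved, stated in full; the proofs are below) =====
def Claim_equal_get_immediate_for_constant : Prop := ∀ (c : Int), Dom_get_immediate_for_constant c → Spec_get_immediate_for_constant c (get_immediate_for_constant c)

-- ===== LEMMAS AND PROOFS =====
lemma compl_testBit : ∀ (i k r : ℕ), r < 2^k → i < k → ((2^k-1) - r).testBit i = !r.testBit i := by
  intro i
  induction i with
  | zero =>
      intro k r hr hi
      have h2 : 2^k = 2 * 2^(k-1) := by
        cases k with
        | zero => omega
        | succ k' => simp [pow_succ, Nat.mul_comm]
      simp only [Nat.testBit_zero]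
      rcases Nat.mod_two_eq_zero_or_one r with h | h <;>
        · have : (2^k - 1 - r) % 2 = 1 - r % 2 := by omega
          simp [this, h]
  | succ i ih =>
      intro k r hr hi
      have h2 : 2^k = 2 * 2^(k-1) := by
        cases k with
        | zero => omega
        | succ k' => simp [pow_succ, Nat.mul_comm]
      have hdiv : (2^k - 1 - r) / 2 = (2^(k-1) - 1) - r / 2 := by omega
      rw [Nat.testBit_succ, hdiv, ih (k-1) (r/2) (by omega) (by omega), ← Nat.testBit_succ]

def pvM (c : Int) : Nat := (PySem.Int.band c 0x7FFFFFFF).toNat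

def pvT (c : Int) (i : Nat) : Prop := PySem.Int.band c (1 <<< i) ≠ 0

lemma mask_toNat : ((0x7FFFFFFF : Int)).toNat = 2^31 - 1 := by decide

lemma pvM_nonneg_form (c : Int) (hc : 0 ≤ c) : pvM c = c.toNat % 2^31 := by
  unfold pvM
  rw [PySem.Int.band_of_nonneg hc (by decide)]
  rw [Int.toNat_natCast, mask_toNat, Nat.and_two_pow_sub_one_eq_mod]

lemma pvM_neg_form (c : Int) (hc : c < 0) : pvM c = (2^31 - 1) - ((-c-1).toNat % 2^31) := by
  unfold pvM
  rw [PySem.Int.band_comm]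
  unfold PySem.Int.band
  rw [if_pos (by decide : (0:Int) ≤ 0x7FFFFFFF), if_neg (by omega : ¬ (0 ≤ c))]
  rw [Int.toNat_natCast, mask_toNat, Nat.and_comm, Nat.and_two_pow_sub_one_eq_mod]

lemma pvM_lt (c : Int) : pvM c < 2 ^ 31 := by
  rcases lt_or_ge c 0 with hc | hc
  · rw [pvM_neg_form c hc]; omega
  · rw [pvM_nonneg_form c hc]; exact Nat.mod_lt _ (by norm_num)

lemma pvT_iff (c : Int) (i : Nat) (hi : i < 31) : pvT c i ↔ (pvM c).testBit i = true := by
  unfold pvT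
  rw [Nat.one_shiftLeft]
  rcases lt_or_ge c 0 with hc | hc
  · rw [pvM_neg_form c hc]
    rw [compl_testBit i 31 _ (Nat.mod_lt _ (by norm_num)) hi]
    rw [Nat.testBit_mod_two_pow]
    unfold PySem.Int.band
    rw [if_neg (by omega : ¬ (0 ≤ c)), if_pos (by positivity : (0:Int) ≤ ((2^i : Nat) : Int))]
    rw [Int.toNat_natCast, Nat.two_pow_and]
    simp only [hi, decide_true, Bool.true_and]
    cases (-c-1).toNat.testBit i <;> simp
  · rw [pvM_nonneg_form c hc]
    rw [PySem.Int.band_of_nonneg hc (by positivity)]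
    rw [Int.toNat_natCast, Nat.and_two_pow, Nat.testBit_mod_two_pow]
    simp only [hi, decide_true, Bool.true_and]
    cases c.toNat.testBit i <;> simp

-- A's loop body
def pvStep (c : Int) (st : Int × Int) (bit : Int) : Int × Int :=
  if PySem.Int.band c (1 <<< bit.toNat) ≠ 0 then
    (if bit < st.1 then bit else st.1, if bit > st.2 then bit else st.2)
  else st

def pvInv (c : Int) (k : Nat) (st : Int × Int) : Prop :=
  ((∀ i, i < k → ¬ pvT c i) ∧ st = (32, -1)) ∨
  (∃ a b : Nat, a ≤ b ∧ b < k ∧ pvT c a ∧ pvT c b ∧ (∀ i, i < a → ¬ pvT c i) ∧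
    (∀ i, b < i → i < k → ¬ pvT c i) ∧ st = ((a : Int), (b : Int)))

lemma pvFold_inv (c : Int) (k : Nat) (hk : k ≤ 31) :
    pvInv c k ((PySem.List.pyRange 0 (k : Int)).foldl (pvStep c) (32, -1)) := by
  induction k with
  | zero => left; exact ⟨by omega, rfl⟩
  | succ n ih =>
      have hn : n ≤ 31 := by omega
      rw [show ((n + 1 : Nat) : Int) = (n : Int) + 1 by push_cast; ring]
      rw [PySem.List.pyRange_one_succ_right (by positivity), List.foldl_append]
      have inv := ih (by omega)
      set st := (PySem.List.pyRange 0 (n : Int)).foldl (pvStep c) (32, -1) with hst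
      simp only [List.foldl_cons, List.foldl_nil]
      by_cases hT : pvT c n
      · have hband : PySem.Int.band c (1 <<< ((n : Int)).toNat) ≠ 0 := by
          simpa [pvT, Int.toNat_natCast] using hT
        rcases inv with ⟨hall, hst'⟩ | ⟨a, b, hab, hbk, hTa, hTb, hmin, hmax, hst'⟩
        · right
          refine ⟨n, n, le_rfl, by omega, hT, hT, hall, by omega, ?_⟩
          rw [hst']
          unfold pvStep
          rw [if_pos hband]
          rw [if_pos (show ((n : Int)) < (32, (-1 : Int)).1 by simp; omega),
              if_pos (show ((n : Int)) > (32, (-1 : Int)).2 by simp; omega)]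
        · right
          refine ⟨a, n, by omega, by omega, hTa, hT, hmin, by omega, ?_⟩
          rw [hst']
          unfold pvStep
          rw [if_pos hband]
          rw [if_neg (show ¬ ((n : Int)) < ((a : Int), (b : Int)).1 by simp; omega),
              if_pos (show ((n : Int)) > ((a : Int), (b : Int)).2 by simp; omega)]
      · have hband : ¬ PySem.Int.band c (1 <<< ((n : Int)).toNat) ≠ 0 := by
          simpa [pvT, Int.toNat_natCast] using hT
        have hstep : pvStep c st ((n : Int)) = st := by
          unfold pvStep; rw [if_neg hband]
        rw [hstep]
        rcases inv with ⟨hall, hst'⟩ | ⟨a, b, hab, hbk, hTa, hTb, hmin, hmax, hst'⟩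
        · left
          refine ⟨fun i hi => ?_, hst'⟩
          rcases Nat.lt_succ_iff_lt_or_eq.mp hi with h | h
          · exact hall i h
          · subst h; exact hT
        · right
          refine ⟨a, b, hab, by omega, hTa, hTb, hmin, fun i hbi hik => ?_, hst'⟩
          rcases Nat.lt_succ_iff_lt_or_eq.mp hik with h | h
          · exact hmax i hbi h
          · subst h; exact hT

lemma pvStripLow_zero : pvStripLow 0 = 0 := by
  unfold pvStripLow; simp

lemma pvStripLow_char (m : Nat) (hm : m ≠ 0) :
    ∃ k, m = 2 ^ k * pvStripLow m ∧ pvStripLow m % 2 = 1 ∧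
      (∀ j, j < k → m.testBit j = false) ∧ m.testBit k = true := by
  induction m using pvStripLow.induct with
  | case1 m h ih =>
      obtain ⟨hne, heven⟩ := h
      rw [pvStripLow, if_pos ⟨hne, heven⟩]
      obtain ⟨k, hk1, hk2, hk3, hk4⟩ := ih (by omega)
      refine ⟨k + 1, ?_, hk2, ?_, ?_⟩
      · have h2 : 2 ^ (k + 1) * pvStripLow (m / 2) = 2 * (2 ^ k * pvStripLow (m / 2)) := by
          rw [pow_succ]; ring
        rw [h2, ← hk1]; omega
      · intro j hj
        cases j with
        | zero => simp [Nat.testBit_zero]; omega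
        | succ j' => rw [Nat.testBit_succ]; exact hk3 j' (by omega)
      · rw [Nat.testBit_succ]; exact hk4
  | case2 m h =>
      rw [pvStripLow, if_neg h]
      have hodd : m % 2 = 1 := by
        by_contra hne
        exact h ⟨hm, by omega⟩
      exact ⟨0, by simp, hodd, by omega, by simp [Nat.testBit_zero]; omega⟩

lemma log2_mul_pow (k s : Nat) (hs : s ≠ 0) : Nat.log2 (2 ^ k * s) = k + Nat.log2 s := by
  have hm : 2 ^ k * s ≠ 0 := by positivity
  have hub : 2 ^ k * s < 2 ^ (k + Nat.log2 s + 1) := by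
    calc 2 ^ k * s < 2 ^ k * 2 ^ (Nat.log2 s + 1) :=
          (Nat.mul_lt_mul_left (by positivity)).mpr Nat.lt_log2_self
      _ = 2 ^ (k + Nat.log2 s + 1) := by rw [← pow_add, ← Nat.add_assoc]
  have hlb : 2 ^ (k + Nat.log2 s) ≤ 2 ^ k * s := by
    calc 2 ^ (k + Nat.log2 s) = 2 ^ k * 2 ^ Nat.log2 s := by rw [pow_add]
      _ ≤ 2 ^ k * s := Nat.mul_le_mul_left _ (Nat.log2_self_le hs)
  have h1 : Nat.log2 (2 ^ k * s) < k + Nat.log2 s + 1 := (Nat.log2_lt hm).mpr hub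
  have h2 : ¬ Nat.log2 (2 ^ k * s) < k + Nat.log2 s := by
    intro h
    exact absurd ((Nat.log2_lt hm).mp h) (by omega)
  omega


theorem get_immediate_eq (c : Int) :
    get_immediate_for_constant c = get_immediate_for_constant_alt c := by
  by_cases hc : c = 0
  · subst hc
    have hb : PySem.Int.band 0 0x7FFFFFFF = 0 := by decide
    simp [get_immediate_for_constant, get_immediate_for_constant_alt, hb, pvStripLow_zero]
  · have halt : get_immediate_for_constant_alt c = decide (pvStripLow (pvM c) < 512) := rfl
    have hA : get_immediate_for_constant c =
        decide (((PySem.List.pyRange 0 ((31 : Nat) : Int)).foldl (pvStep c) (32, -1)).2 -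
                ((PySem.List.pyRange 0 ((31 : Nat) : Int)).foldl (pvStep c) (32, -1)).1 ≤ 8) := by
      unfold get_immediate_for_constant
      rw [if_neg hc]
      rfl
    have inv := pvFold_inv c 31 le_rfl
    set st := (PySem.List.pyRange 0 ((31 : Nat) : Int)).foldl (pvStep c) (32, -1) with hst
    by_cases hm : pvM c = 0
    · have hnone : ∀ i, i < 31 → ¬ pvT c i := by
        intro i hi hT
        have := (pvT_iff c i hi).mp hT
        rw [hm] at this
        simp at this
      rcases inv with ⟨_, hst'⟩ | ⟨a, b, hab, hbk, hTa, _, _, _, _⟩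
      · rw [hA, hst', halt, hm, pvStripLow_zero]
        decide
      · exact absurd hTa (hnone a (by omega))
    · obtain ⟨k, hk1, hk2, hk3, hk4⟩ := pvStripLow_char (pvM c) hm
      set s := pvStripLow (pvM c) with hs
      have hsne : s ≠ 0 := by omega
      have hlog31 : Nat.log2 (pvM c) < 31 := (Nat.log2_lt hm).mpr (pvM_lt c)
      have hTlog : pvT c (Nat.log2 (pvM c)) :=
        (pvT_iff c _ hlog31).mpr (Nat.testBit_log2 hm)
      rcases inv with ⟨hall, _⟩ | ⟨a, b, hab, hbk, hTa, hTb, hmin, hmax, hst'⟩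
      · exact absurd hTlog (hall _ hlog31)
      · have hk31 : k < 31 := by
          have h2k : 2 ^ k ≤ pvM c := by
            rw [hk1]; exact Nat.le_mul_of_pos_right _ (by omega)
          have := pvM_lt c
          by_contra h
          have : (2:Nat) ^ 31 ≤ 2 ^ k := Nat.pow_le_pow_right (by omega) (by omega)
          omega
        have hak : a = k := by
          by_contra hne
          rcases Nat.lt_or_ge a k with h | h
          · exact absurd ((pvT_iff c a (by omega)).mp hTa) (by simp [hk3 a h])
          · exact absurd ((pvT_iff c k hk31).mpr hk4) (hmin k (by omega))
        have hblog : b = Nat.log2 (pvM c) := by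
          by_contra hne
          rcases Nat.lt_or_ge b (Nat.log2 (pvM c)) with h | h
          · exact absurd hTlog (hmax _ h hlog31)
          · have htb : (pvM c).testBit b = true := (pvT_iff c b (by omega)).mp hTb
            have h2b : 2 ^ b ≤ pvM c := Nat.ge_two_pow_of_testBit htb
            have : Nat.log2 (pvM c) < b := by omega
            have := (Nat.log2_lt hm).mp this
            omega
        have hlogsum : Nat.log2 (pvM c) = k + Nat.log2 s := by
          rw [hk1] at hm ⊢
          exact log2_mul_pow k s hsne
        have hiff : Nat.log2 s < 9 ↔ s < 512 := by
          have := Nat.log2_lt hsne (k := 9)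
          norm_num at this
          exact this
        rw [hA, hst', halt]
        simp only [decide_eq_decide]
        rw [hak, hblog, hlogsum]
        push_cast
        omega

-- ===== VERDICT (by name: the statement is the Claim_ definition above) =====
theorem get_immediate_for_constant_spec : Claim_equal_get_immediate_for_constant := by
  intro c _
  unfold Spec_get_immediate_for_constant
  exact get_immediate_eq c
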